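-- pv_equiv track=rewrite | github.com/isilanes/myeuler | p150/p150.py | f0
-- ===== SOURCE A (Python) =====
-- def f0(n):
--
--     def build_s(n):
--         """Return s(k) for k in range(1,N+1), as array.
--         N = n*(n+1)/2, that is, "n" is the amount of lines,
--         and N is the amount of numbers.
--         Technically, s(k) would be s[k-1] here: s(1) is the
--         first (zero) element of the array this function returns.
--         """
--         s = []
--         t = 0
--         for k in range(n*(n+1)//2):
--             t = (615949*t + 797807) % 1048576 # 2**20 = 1048576
--             s.append(t - 524288)  # 2**19 = 524288
--
--         return s
--
--     def subt(triang,i,j,k):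
--         if k == 0:
--             return triang[i][j]
--         else:
--             return subt(triang,i,j,k-1) + sum(triang[i+k][j:j+k+1])
--
--     # Build triangle:
--     s = build_s(n)
--
--     k = 0
--     triang = []
--     for i in range(n):
--         triang.append([])
--         for j in range(i+1):
--             triang[-1].append(s[k])
--             k += 1
--
--     # Find the sums of all subtriangles:
--     ms = 0
--     for i in range(n):
--         for j in range(i+1):
--             for k in range(n-i):
--                 ret = subt(triang,i,j,k)
--                 if ret < ms:
--                     ms = ret
--
--     return ms
-- ===== SOURCE B (Python) =====
-- def f0(n):
--     # Pseudo-random sequence (same generator as the problem statement):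
--     s = []
--     t = 0
--     for _ in range(n*(n+1)//2):
--         t = (615949*t + 797807) % 1048576
--         s.append(t - 524288)
--
--     # Triangle rows:
--     triang = []
--     k = 0
--     for i in range(n):
--         row = []
--         for _ in range(i+1):
--             row.append(s[k])
--             k += 1
--         triang.append(row)
--
--     # Prefix sums per row: pref[r][b] = sum of triang[r][:b]
--     pref = []
--     for row in triang:
--         p = [0]
--         for x in row:
--             p.append(p[-1] + x)
--         pref.append(p)
--
--     # Incremental sub-triangle sums: O(1) per (i, j, k) via prefix sums.
--     ms = 0
--     for i in range(n):
--         for j in range(i+1):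
--             acc = 0
--             for k in range(n-i):
--                 acc += pref[i+k][j+k+1] - pref[i+k][j]
--                 if acc < ms:
--                     ms = acc
--     return ms
-- ===== Notes on version B (the rewrite author's own statement) =====
-- stated objective: faster
-- what changed: Replaces A's recursive subt(), which re-sums every row slice of every sub-triangle from scratch, with per-row prefix sums and an incremental accumulator that extends each sub-triangle by one row in O(1).
import Mathlib
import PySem

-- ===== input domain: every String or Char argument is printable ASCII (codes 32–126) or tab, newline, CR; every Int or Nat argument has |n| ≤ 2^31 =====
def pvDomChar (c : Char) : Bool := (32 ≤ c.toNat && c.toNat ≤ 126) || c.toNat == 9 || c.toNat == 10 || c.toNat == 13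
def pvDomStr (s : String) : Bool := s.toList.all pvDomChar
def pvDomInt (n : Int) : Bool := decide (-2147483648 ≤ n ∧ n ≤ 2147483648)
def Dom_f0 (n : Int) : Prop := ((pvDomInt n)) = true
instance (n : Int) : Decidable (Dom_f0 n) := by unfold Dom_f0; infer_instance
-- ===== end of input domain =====

-- B replaces A's recursive subt(), which re-sums every row slice of every sub-triangle,
-- by per-row prefix sums and an incremental accumulator; same return value.

-- ===== PORT A =====
-- build_s: n*(n+1)//2 is always ≥ 0 (product of consecutive ints), so .toNat is exact.
-- s.append(x) is ported as cons + one final reverse (the same list, built in linear time).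
def buildS_A (n : Int) : List Int :=
  (((List.range ((PySem.Int.floordiv (n * (n + 1)) 2).toNat)).foldl
    (fun (st : List Int × Int) _ =>
      let t := PySem.Int.mod (615949 * st.2 + 797807) 1048576
      ((t - 524288) :: st.1, t)) ([], 0)).1).reverse

-- subt: k comes from range(n-i), so k ≥ 0 (Nat recursion is Python's k-1 recursion).
-- Every index f0 passes is in range, so getD is exact; the slice triang[i+k][j:j+k+1]
-- has 0 ≤ j, so it is exactly (drop j) then (take (k+1)).
def subt_A (tri : List (List Int)) (i j : Nat) : Nat → Int
  | 0 => (tri.getD i []).getD j 0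
  | (k + 1) => subt_A tri i j k + (((tri.getD (i + k + 1) []).drop j).take (k + 2)).sum

-- the triangle-building loop: triang.append([]) then per-j append of s[k]
def buildTri_A (n : Int) (s : List Int) : List (List Int) :=
  ((List.range n.toNat).foldl
    (fun (st : List (List Int) × Nat) i =>
      let r := (List.range (i + 1)).foldl
        (fun (st2 : List Int × Nat) _ => (st2.1 ++ [s.getD st2.2 0], st2.2 + 1)) ([], st.2)
      (st.1 ++ [r.1], r.2)) ([], 0)).1

def f0 (n : Int) : Int :=
  let s := buildS_A n
  let tri := buildTri_A n s
  (List.range n.toNat).foldl (fun ms i =>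
    (List.range (i + 1)).foldl (fun ms j =>
      (List.range (n.toNat - i)).foldl (fun ms k =>
        let ret := subt_A tri i j k
        if ret < ms then ret else ms) ms) ms) 0

-- ===== PORT B =====
-- B's Python lists (O(1) append and O(1) indexing) are ported as Lean Arrays:
-- push is list.append, Array.getD reads an index that is always in range in B.
def buildS_B (n : Int) : Array Int :=
  ((List.range ((PySem.Int.floordiv (n * (n + 1)) 2).toNat)).foldl
    (fun (st : Array Int × Int) _ =>
      let t := PySem.Int.mod (615949 * st.2 + 797807) 1048576
      (st.1.push (t - 524288), t)) (#[], 0)).1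

def buildTri_B (n : Int) (s : Array Int) : Array (Array Int) :=
  ((List.range n.toNat).foldl
    (fun (st : Array (Array Int) × Nat) i =>
      let r := (List.range (i + 1)).foldl
        (fun (st2 : Array Int × Nat) _ => (st2.1.push (s.getD st2.2 0), st2.2 + 1)) (#[], st.2)
      (st.1.push r.1, r.2)) (#[], 0)).1

-- p = [0]; for x in row: p.append(p[-1] + x)   (p is never empty, so p[-1] = back)
def prefRow_B (row : Array Int) : Array Int :=
  row.foldl (fun p x => p.push (p.back?.getD 0 + x)) #[0]

def f0_alt (n : Int) : Int :=
  let s := buildS_B n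
  let tri := buildTri_B n s
  let pref := tri.foldl (fun pr row => pr.push (prefRow_B row)) #[]
  (List.range n.toNat).foldl (fun ms i =>
    (List.range (i + 1)).foldl (fun ms j =>
      ((List.range (n.toNat - i)).foldl (fun (st : Int × Int) k =>
        let acc := st.2 + ((pref.getD (i + k) #[]).getD (j + k + 1) 0
                           - (pref.getD (i + k) #[]).getD j 0)
        (if acc < st.1 then acc else st.1, acc)) (ms, 0)).1) ms) 0

-- ===== PRECONDITION & SPEC =====
def Spec_f0 (n : Int) (out : Int) : Prop := out = f0_alt n
instance (n : Int) (out : Int) : Decidable (Spec_f0 n out) := by unfold Spec_f0; infer_instance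

-- ===== CLAIM (what is proved, stated in full; the proofs are below) =====
def Claim_equal_f0 : Prop := ∀ (n : Int), Dom_f0 n → Spec_f0 n (f0 n)

-- ===== LEMMAS AND PROOFS =====

-- list-level image of B's prefix-sum row (proof-side helper)
def prefRow_L (row : List Int) : List Int :=
  row.foldl (fun p x => p ++ [p.getLast?.getD 0 + x]) [0]

-- Array.getD reads the same element as List.getD on toList
theorem arrGetD {α : Type} (a : Array α) (i : Nat) (d : α) :
    a.getD i d = a.toList.getD i d := by
  simp [Array.getD, List.getD]
  split
  · rename_i h; simp [Array.getElem?_eq_getElem h]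
  · rename_i h; simp [Array.getElem?_eq_none (xs := a) (i := i) (by omega)]

theorem toList_getD_arr {α : Type} (l : List (Array α)) (r : Nat) :
    (l.getD r #[]).toList = (l.map Array.toList).getD r [] := by
  induction l generalizing r with
  | nil => simp
  | cons x xs ih =>
    cases r with
    | zero => simp
    | succ r => simp only [List.map_cons, List.getD_cons_succ]; exact ih r

-- the inner row-building fold appends one element of s per step
theorem rowFold_eq (s : List Int) (m : Nat) : ∀ (row : List Int) (k : Nat),
    (List.range m).foldl
      (fun (st2 : List Int × Nat) _ => (st2.1 ++ [s.getD st2.2 0], st2.2 + 1)) (row, k)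
    = (row ++ (List.range m).map (fun t => s.getD (k + t) 0), k + m) := by
  induction m with
  | zero => intro row k; simp
  | succ m ih =>
    intro row k
    rw [List.range_succ, List.foldl_append, ih]
    simp [List.map_append, List.append_assoc]
    omega

-- shape of the triangle: row r has length r + 1
theorem triShape (n : Int) (s : List Int) :
    (buildTri_A n s).length = n.toNat ∧
    ∀ r, r < n.toNat → ((buildTri_A n s).getD r []).length = r + 1 := by
  unfold buildTri_A
  simp only [rowFold_eq, List.nil_append]
  generalize n.toNat = m
  induction m with
  | zero => simp
  | succ m ih =>
    obtain ⟨ih1, ih2⟩ := ih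
    rw [List.range_succ, List.foldl_append]
    simp only [List.foldl_cons, List.foldl_nil]
    refine ⟨by simp only [List.length_append, List.length_cons, List.length_nil, ih1], ?_⟩
    intro r hr
    rcases Nat.lt_or_ge r m with h | h
    · rw [List.getD_append _ _ _ _ (by omega), ih2 r h]
    · have hrm : r = m := by omega
      subst hrm
      rw [List.getD_append_right _ _ _ _ (by omega), ih1]
      simp only [Nat.sub_self, List.getD_cons_zero, List.length_map, List.length_range]

-- the prefix-sum fold, generalized over the start list
theorem prefFold (row : List Int) : ∀ (p : List Int) (c : Int), p.getLast?.getD 0 = c →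
    row.foldl (fun p x => p ++ [p.getLast?.getD 0 + x]) p
    = p ++ (List.range row.length).map (fun i => c + (row.take (i + 1)).sum) := by
  induction row with
  | nil => intro p c _; simp
  | cons x xs ih =>
    intro p c hc
    simp only [List.foldl_cons, hc]
    rw [ih (p ++ [c + x]) (c + x) (by simp)]
    rw [List.length_cons, List.range_succ_eq_map]
    simp [List.map_map, Function.comp_def, add_assoc, List.append_assoc]

-- prefix-sum row: prefRow_L row = 0 :: partial sums
theorem prefRow_eq (row : List Int) :
    prefRow_L row = 0 :: (List.range row.length).map (fun i => (row.take (i + 1)).sum) := by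
  unfold prefRow_L
  rw [prefFold row [0] 0 (by simp)]
  simp

theorem prefRow_getD (row : List Int) (b : Nat) (hb : b ≤ row.length) :
    (prefRow_L row).getD b 0 = (row.take b).sum := by
  rw [prefRow_eq]
  cases b with
  | zero => simp
  | succ b =>
    rw [List.getD_cons_succ, PySem.List.getD_map_range _ _ _ _ (by omega)]

-- difference of prefix sums is a segment sum
theorem seg_sum (row : List Int) (a b : Nat) (hab : a ≤ b) :
    (row.take b).sum - (row.take a).sum = ((row.drop a).take (b - a)).sum := by
  have h : b = a + (b - a) := by omega
  conv_lhs => rw [h, List.take_add, List.sum_append]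
  ring

theorem getD_map_prefRow (tri : List (List Int)) (r : Nat) (h : r < tri.length) :
    (tri.map prefRow_L).getD r [] = prefRow_L (tri.getD r []) := by
  rw [List.getD_eq_getElem _ _ (by simpa using h), List.getElem_map,
      List.getD_eq_getElem _ _ h]

theorem drop_take_one (row : List Int) (j : Nat) (h : j < row.length) :
    ((row.drop j).take 1).sum = row.getD j 0 := by
  rw [List.drop_eq_getElem_cons h]
  simp only [List.take_succ_cons, List.take_zero, List.sum_cons, List.sum_nil, add_zero]
  rw [List.getD_eq_getElem _ _ h]

-- accumulator value carried by B's inner loop after m iterations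
def accVal (tri : List (List Int)) (i j : Nat) : Nat → Int
  | 0 => 0
  | (m + 1) => subt_A tri i j m

-- one incremental step of B's accumulator reproduces A's recursive sub-triangle sum
theorem acc_step (tri : List (List Int)) (N : Nat) (hlen : tri.length = N)
    (hrow : ∀ r, r < N → (tri.getD r []).length = r + 1)
    (i j k : Nat) (hj : j ≤ i) (hk : i + k < N) :
    accVal tri i j k + (((tri.map prefRow_L).getD (i + k) []).getD (j + k + 1) 0
      - ((tri.map prefRow_L).getD (i + k) []).getD j 0) = subt_A tri i j k := by
  have hrk : i + k < tri.length := by omega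
  rw [getD_map_prefRow tri (i + k) hrk]
  have hL : (tri.getD (i + k) []).length = i + k + 1 := hrow _ hk
  rw [prefRow_getD _ _ (by omega), prefRow_getD _ _ (by omega),
      seg_sum _ j (j + k + 1) (by omega)]
  have hsub : j + k + 1 - j = k + 1 := by omega
  rw [hsub]
  cases k with
  | zero =>
    show (0 : Int) + _ = _
    rw [zero_add, drop_take_one _ _ (by omega)]
    rfl
  | succ e => rfl

-- B's inner loop (in its list-level image) computes A's inner loop plus the accumulator
theorem inner_eq (tri : List (List Int)) (N : Nat)
    (hlen : tri.length = N)
    (hrow : ∀ r, r < N → (tri.getD r []).length = r + 1)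
    (i j : Nat) (hj : j ≤ i) (m : Nat) (hm : i + m ≤ N) (ms : Int) :
    (List.range m).foldl (fun (st : Int × Int) k =>
        let acc := st.2 + (((tri.map prefRow_L).getD (i + k) []).getD (j + k + 1) 0
                           - ((tri.map prefRow_L).getD (i + k) []).getD j 0)
        (if acc < st.1 then acc else st.1, acc)) (ms, 0)
    = ((List.range m).foldl (fun ms k =>
        let ret := subt_A tri i j k
        if ret < ms then ret else ms) ms, accVal tri i j m) := by
  induction m with
  | zero => simp [accVal]
  | succ m ih =>
    rw [List.range_succ, List.foldl_append, List.foldl_append, ih (by omega)]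
    simp only [List.foldl_cons, List.foldl_nil]
    rw [acc_step tri N hlen hrow i j m hj (by omega)]
    rfl

-- ===== bridges from B's Array port to its list-level image =====

theorem bS (n : Int) : (buildS_B n).toList = buildS_A n := by
  unfold buildS_B buildS_A
  have h := List.foldl_hom
    (l := List.range ((PySem.Int.floordiv (n * (n + 1)) 2).toNat))
    (init := ((#[] : Array Int), (0 : Int)))
    (g₁ := fun (st : Array Int × Int) (_ : Nat) =>
      let t := PySem.Int.mod (615949 * st.2 + 797807) 1048576
      (st.1.push (t - 524288), t))
    (g₂ := fun (st : List Int × Int) (_ : Nat) =>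
      let t := PySem.Int.mod (615949 * st.2 + 797807) 1048576
      ((t - 524288) :: st.1, t))
    (fun (st : Array Int × Int) => (st.1.toList.reverse, st.2))
    (fun x y => by simp [Array.toList_push])
  simp only [List.reverse_nil] at h
  have h1 := congrArg Prod.fst h
  exact ((congrArg List.reverse h1).trans (List.reverse_reverse _)).symm

theorem bTri (n : Int) (sa : Array Int) (sl : List Int) (hs : sa.toList = sl) :
    (buildTri_B n sa).toList.map Array.toList = buildTri_A n sl := by
  unfold buildTri_B buildTri_A
  have hrow : ∀ (k : Nat) (i : Nat),
      (List.range (i + 1)).foldl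
        (fun (st2 : List Int × Nat) _ => (st2.1 ++ [sl.getD st2.2 0], st2.2 + 1)) ([], k)
      = ((((List.range (i + 1)).foldl
            (fun (st2 : Array Int × Nat) _ => (st2.1.push (sa.getD st2.2 0), st2.2 + 1))
            (#[], k)).1).toList,
         ((List.range (i + 1)).foldl
            (fun (st2 : Array Int × Nat) _ => (st2.1.push (sa.getD st2.2 0), st2.2 + 1))
            (#[], k)).2) := by
    intro k i
    have h := List.foldl_hom
      (l := List.range (i + 1)) (init := ((#[] : Array Int), k))
      (g₁ := fun (st2 : Array Int × Nat) (_ : Nat) => (st2.1.push (sa.getD st2.2 0), st2.2 + 1))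
      (g₂ := fun (st2 : List Int × Nat) (_ : Nat) => (st2.1 ++ [sl.getD st2.2 0], st2.2 + 1))
      (fun (st2 : Array Int × Nat) => (st2.1.toList, st2.2))
      (fun x y => by subst hs; simp [Array.toList_push])
    beta_reduce at h
    rw [← h]
  have h := List.foldl_hom
    (l := List.range n.toNat) (init := ((#[] : Array (Array Int)), 0))
    (g₁ := fun (st : Array (Array Int) × Nat) i =>
      let r := (List.range (i + 1)).foldl
        (fun (st2 : Array Int × Nat) _ => (st2.1.push (sa.getD st2.2 0), st2.2 + 1)) (#[], st.2)
      (st.1.push r.1, r.2))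
    (g₂ := fun (st : List (List Int) × Nat) i =>
      let r := (List.range (i + 1)).foldl
        (fun (st2 : List Int × Nat) _ => (st2.1 ++ [sl.getD st2.2 0], st2.2 + 1)) ([], st.2)
      (st.1 ++ [r.1], r.2))
    (fun (st : Array (Array Int) × Nat) => (st.1.toList.map Array.toList, st.2))
    (fun x y => by simp only []; rw [hrow x.2 y]; simp [Array.toList_push])
  simp only [List.map_nil] at h
  exact (congrArg Prod.fst h).symm

theorem bPrefRow (row : Array Int) : (prefRow_B row).toList = prefRow_L row.toList := by
  unfold prefRow_B prefRow_L
  rw [← Array.foldl_toList]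
  have h := List.foldl_hom
    (l := row.toList) (init := (#[0] : Array Int))
    (g₁ := fun (p : Array Int) x => p.push (p.back?.getD 0 + x))
    (g₂ := fun (p : List Int) x => p ++ [p.getLast?.getD 0 + x])
    (fun (p : Array Int) => p.toList)
    (fun x y => by simp [Array.toList_push, Array.getLast?_toList])
  simpa using h.symm

-- B's pref[r][b], read through arrays, is the list-level prefix-sum table entry
theorem pref_getD (n : Int) (r b : Nat) :
    (((buildTri_B n (buildS_B n)).foldl
        (fun pr row => pr.push (prefRow_B row)) #[]).getD r #[]).getD b 0
    = (((buildTri_A n (buildS_A n)).map prefRow_L).getD r []).getD b 0 := by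
  have hpref : ((buildTri_B n (buildS_B n)).foldl
      (fun pr row => pr.push (prefRow_B row)) #[]).toList
      = ((buildTri_B n (buildS_B n)).toList).map prefRow_B := by
    rw [← Array.foldl_toList]
    have h := List.foldl_hom
      (l := (buildTri_B n (buildS_B n)).toList) (init := (#[] : Array (Array Int)))
      (g₁ := fun (pr : Array (Array Int)) row => pr.push (prefRow_B row))
      (g₂ := fun (pr : List (Array Int)) row => pr ++ [prefRow_B row])
      (fun (pr : Array (Array Int)) => pr.toList)
      (fun x y => by simp [Array.toList_push])
    beta_reduce at h
    rw [← h, PySem.List.foldl_append_singleton_eq_map, List.nil_append]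
  rw [arrGetD, arrGetD, hpref, toList_getD_arr, List.map_map]
  have hmap : (Array.toList ∘ prefRow_B) = (fun row => prefRow_L row.toList) := by
    funext row; exact bPrefRow row
  rw [hmap, show (fun row => prefRow_L row.toList)
        = (prefRow_L ∘ Array.toList) from rfl, ← List.map_map,
      bTri n (buildS_B n) (buildS_A n) (bS n)]

theorem f0_eq (n : Int) : f0 n = f0_alt n := by
  simp only [f0, f0_alt]
  obtain ⟨hlen, hrow⟩ := triShape n (buildS_A n)
  refine PySem.List.foldl_congr_mem _ _ _ _ ?_
  intro ms i hi
  have hi' : i < n.toNat := List.mem_range.mp hi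
  refine PySem.List.foldl_congr_mem _ _ _ _ ?_
  intro ms2 j hj
  have hj' : j ≤ i := by have := List.mem_range.mp hj; omega
  have hB : (List.range (n.toNat - i)).foldl (fun (st : Int × Int) k =>
      let acc := st.2 + ((((buildTri_B n (buildS_B n)).foldl
            (fun pr row => pr.push (prefRow_B row)) #[]).getD (i + k) #[]).getD (j + k + 1) 0
        - (((buildTri_B n (buildS_B n)).foldl
            (fun pr row => pr.push (prefRow_B row)) #[]).getD (i + k) #[]).getD j 0)
      (if acc < st.1 then acc else st.1, acc)) (ms2, 0)
    = (List.range (n.toNat - i)).foldl (fun (st : Int × Int) k =>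
      let acc := st.2 + ((((buildTri_A n (buildS_A n)).map prefRow_L).getD (i + k) []).getD (j + k + 1) 0
        - (((buildTri_A n (buildS_A n)).map prefRow_L).getD (i + k) []).getD j 0)
      (if acc < st.1 then acc else st.1, acc)) (ms2, 0) := by
    refine PySem.List.foldl_congr_mem _ _ _ _ ?_
    intro st k _
    simp only [pref_getD]
  rw [hB, inner_eq (buildTri_A n (buildS_A n)) n.toNat hlen hrow i j hj' (n.toNat - i)
      (by omega) ms2]

-- ===== VERDICT (by name: the statement is the Claim_ definition above) =====
theorem f0_spec : Claim_equal_f0 := by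
  intro n _
  unfold Spec_f0
  exact f0_eq n
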